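-- pv_equiv track=rewrite | github.com/CryptoCOB/Voxsigil-Library | core/grid_former_evaluator.py | _has_boundary_pattern
-- ===== SOURCE A (Python) =====
-- from typing import List, Dict, Any, Optional
--
-- def _has_boundary_pattern(grid: List[List[int]]) -> bool:
--     """Check if grid has distinct boundary patterns"""
--     try:
--         if not grid or len(grid) < 3 or not grid[0] or len(grid[0]) < 3:
--             return False
--
--         # Check if boundary is different from interior
--         boundary_colors = set()
--         interior_colors = set()
--
--         for i in range(len(grid)):
--             for j in range(len(grid[i])):
--                 if i == 0 or i == len(grid) - 1 or j == 0 or j == len(grid[i]) - 1: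
--                     boundary_colors.add(grid[i][j])
--                 else:
--                     interior_colors.add(grid[i][j])
--
--         return len(boundary_colors.intersection(interior_colors)) < min(len(boundary_colors), len(interior_colors))
--
--     except Exception:
--         return False
-- ===== SOURCE B (Python) =====
-- def _has_boundary_pattern(grid):
--     if not grid or len(grid) < 3 or not grid[0] or len(grid[0]) < 3:
--         return False
--     # boundary cells: first row, last row, and the two edge cells of each nonempty middle row
--     boundary = list(grid[0]) + list(grid[-1])
--     interior = []
--     for row in grid[1:-1]:
--         if row:
--             boundary.append(row[0])
--             boundary.append(row[-1])
--         interior.extend(row[1:-1])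
--     # A's |B∩I| < min(|B|,|I|) on the deduped sets holds iff neither side's colors
--     # are contained in the other's: some boundary-only color AND some interior-only color.
--     return any(v not in interior for v in boundary) and any(v not in boundary for v in interior)
-- ===== Notes on version B (the rewrite author's own statement) =====
-- stated objective: alternative
-- what changed: A classifies every cell by an i/j index test into two dedup sets and compares the intersection's cardinality with the smaller set's; B collects boundary values from the first/last rows and each middle row's edge cells and interior values from the middle slices as plain lists (no sets, no cardinalities) and decides by two existence checks: some boundary value absent from the interior and some interior value absent from the boundary.
import Mathlib
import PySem

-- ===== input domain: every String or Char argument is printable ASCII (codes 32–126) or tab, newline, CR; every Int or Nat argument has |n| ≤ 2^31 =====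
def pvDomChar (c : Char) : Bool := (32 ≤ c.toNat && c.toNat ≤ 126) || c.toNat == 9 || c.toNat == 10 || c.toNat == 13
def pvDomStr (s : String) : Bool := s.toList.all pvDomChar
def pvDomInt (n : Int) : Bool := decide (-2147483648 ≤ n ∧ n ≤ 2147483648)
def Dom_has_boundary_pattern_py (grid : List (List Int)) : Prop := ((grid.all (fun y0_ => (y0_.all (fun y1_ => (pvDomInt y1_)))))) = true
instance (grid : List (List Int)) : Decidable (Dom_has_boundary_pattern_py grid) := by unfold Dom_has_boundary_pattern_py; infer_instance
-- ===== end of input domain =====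

-- B replaces A's set building and intersection-cardinality test by plain boundary/interior value
-- lists and two membership existence checks (objective: alternative algorithm, same result).

-- ===== PORT A =====
-- literal transliteration of A: guard, then a per-cell double index loop classifying each cell
-- into the boundary/interior sets, then the intersection-size comparison.
def has_boundary_pattern_py (grid : List (List Int)) : Bool :=
  if grid = [] ∨ (grid.length : Int) < 3 ∨ PySem.List.pyGetD grid 0 [] = [] ∨ ((PySem.List.pyGetD grid 0 []).length : Int) < 3 then
    false
  else
    let st := (PySem.List.pyRange 0 (grid.length : Int) 1).foldl
      (fun (st : PySem.Set Int × PySem.Set Int) i =>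
        (PySem.List.pyRange 0 ((PySem.List.pyGetD grid i []).length : Int) 1).foldl
          (fun st j =>
            if i = 0 ∨ i = (grid.length : Int) - 1 ∨ j = 0 ∨ j = ((PySem.List.pyGetD grid i []).length : Int) - 1 then
              (PySem.Set.add st.1 (PySem.List.pyGetD (PySem.List.pyGetD grid i []) j 0), st.2)
            else
              (st.1, PySem.Set.add st.2 (PySem.List.pyGetD (PySem.List.pyGetD grid i []) j 0)))
          st)
      (PySem.Set.empty, PySem.Set.empty)
    decide ((PySem.Set.inter st.1 st.2).length < min st.1.length st.2.length)

-- ===== PORT B =====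
-- literal transliteration of B: same guard; boundary list = grid[0] ++ grid[-1] ++ the two edge
-- cells of each nonempty middle row; interior list = concatenation of the middle rows' [1:-1]
-- slices; result = two `any`-with-membership existence checks.
def has_boundary_pattern_py_alt (grid : List (List Int)) : Bool :=
  if grid = [] ∨ (grid.length : Int) < 3 ∨ PySem.List.pyGetD grid 0 [] = [] ∨ ((PySem.List.pyGetD grid 0 []).length : Int) < 3 then
    false
  else
    let st := (PySem.List.slice grid (some 1) (some (-1))).foldl
      (fun (st : List Int × List Int) row =>
        ((if row = [] then st.1
          else st.1 ++ [PySem.List.pyGetD row 0 0, PySem.List.pyGetD row (-1) 0]),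
         st.2 ++ PySem.List.slice row (some 1) (some (-1))))
      (PySem.List.pyGetD grid 0 [] ++ PySem.List.pyGetD grid (-1) [], [])
    (st.1.any (fun v => !decide (v ∈ st.2))) && (st.2.any (fun v => !decide (v ∈ st.1)))

-- ===== PRECONDITION & SPEC =====
def Spec_has_boundary_pattern_py (grid : List (List Int)) (out : Bool) : Prop := out = has_boundary_pattern_py_alt grid
instance (grid : List (List Int)) (out : Bool) : Decidable (Spec_has_boundary_pattern_py grid out) := by unfold Spec_has_boundary_pattern_py; infer_instance

-- ===== CLAIM (what is proved, stated in full; the proofs are below) =====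
def Claim_equal_has_boundary_pattern_py : Prop := ∀ (grid : List (List Int)), Dom_has_boundary_pattern_py grid → Spec_has_boundary_pattern_py grid (has_boundary_pattern_py grid)

-- ===== LEMMAS AND PROOFS =====

-- membership/nodup of a fold of Set.update
theorem mem_foldl_upd {γ : Type} (l : List γ) (f : γ → List Int) (s : PySem.Set Int) (x : Int) :
    x ∈ l.foldl (fun s a => PySem.Set.update s (f a)) s ↔ x ∈ s ∨ ∃ a ∈ l, x ∈ f a := by
  induction l generalizing s with
  | nil => simp
  | cons a t ih => simp [ih, PySem.Set.mem_update]; tauto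

theorem nodup_foldl_upd {γ : Type} (l : List γ) (f : γ → List Int) (s : PySem.Set Int)
    (hs : s.Nodup) : (l.foldl (fun s a => PySem.Set.update s (f a)) s).Nodup := by
  induction l generalizing s with
  | nil => exact hs
  | cons a t ih => exact ih _ (PySem.Set.nodup_update _ _ hs)

-- xs[-1] as xs[len-1]
theorem pyGetD_neg_one_eq {α : Type} (l : List α) (d : α) (h : l ≠ []) :
    PySem.List.pyGetD l (-1) d = PySem.List.pyGetD l ((l.length : Int) - 1) d := by
  have hlen : 0 < l.length := List.length_pos_iff.mpr h
  rw [PySem.List.pyGetD_neg_one l d h, PySem.List.pyGetD_eq_getElem _ _ (by omega) (by omega)]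
  rw [List.getLast_eq_getElem]
  congr 1
  omega

-- xs[1:-1] as drop/take
theorem slice_mid {α : Type} (l : List α) :
    PySem.List.slice l (some 1) (some (-1)) = (l.drop 1).take (l.length - 2) := by
  rcases l with _ | ⟨a, t⟩
  · rfl
  · simp [PySem.List.slice, PySem.List.clampIdx]
    split_ifs with hif
    · exfalso; omega
    · omega

theorem mem_drop_one_take {α : Type} (l : List α) (k : Nat) (x : α) :
    x ∈ (l.drop 1).take k ↔ ∃ j : Nat, j < k ∧ ∃ h : j + 1 < l.length, x = l[j + 1] := by
  constructor
  · intro hx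
    rw [List.mem_iff_getElem] at hx
    obtain ⟨j, hj, hx⟩ := hx
    have hlen : j < k ∧ j + 1 < l.length := by
      simp [List.length_take] at hj; omega
    refine ⟨j, hlen.1, hlen.2, ?_⟩
    rw [← hx, List.getElem_take, List.getElem_drop]
    congr 1
    omega
  · rintro ⟨j, hj, h, rfl⟩
    rw [List.mem_iff_getElem]
    refine ⟨j, ?_, ?_⟩
    · simp [List.length_take]; omega
    · rw [List.getElem_take, List.getElem_drop]
      congr 1
      omega

-- "some index j of row hits x" is plain membership
theorem mem_row_iff (row : List Int) (x : Int) :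
    (∃ j ∈ PySem.List.pyRange 0 (row.length : Int) 1, x = PySem.List.pyGetD row j 0) ↔ x ∈ row := by
  constructor
  · rintro ⟨j, hj, rfl⟩
    rw [PySem.List.mem_pyRange_one] at hj
    rw [PySem.List.pyGetD_eq_getElem _ _ hj.1 (by exact_mod_cast hj.2)]
    exact List.getElem_mem _
  · intro hx
    rw [List.mem_iff_getElem] at hx
    obtain ⟨k, hk, rfl⟩ := hx
    refine ⟨(k : Int), ?_, ?_⟩
    · rw [PySem.List.mem_pyRange_one]; exact ⟨by positivity, by exact_mod_cast hk⟩
    · rw [PySem.List.pyGetD_eq_getElem _ _ (by positivity) (by exact_mod_cast hk)]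
      simp

-- row-local boundary positions are exactly row[0] / row[-1] of a nonempty row
theorem edge_iff (row : List Int) (x : Int) :
    (∃ j ∈ PySem.List.pyRange 0 (row.length : Int) 1,
        (j = 0 ∨ j = (row.length : Int) - 1) ∧ x = PySem.List.pyGetD row j 0)
      ↔ (row ≠ [] ∧ (x = PySem.List.pyGetD row 0 0 ∨ x = PySem.List.pyGetD row (-1) 0)) := by
  constructor
  · rintro ⟨j, hj, hd, rfl⟩
    rw [PySem.List.mem_pyRange_one] at hj
    have hne : row ≠ [] := by
      intro h; subst h; simp at hj; omega
    refine ⟨hne, ?_⟩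
    rcases hd with rfl | rfl
    · left; rfl
    · right; rw [pyGetD_neg_one_eq row 0 hne]
  · rintro ⟨hne, hx⟩
    have hlen : 0 < row.length := List.length_pos_iff.mpr hne
    rcases hx with rfl | rfl
    · exact ⟨0, by rw [PySem.List.mem_pyRange_one]; constructor <;> omega, Or.inl rfl, rfl⟩
    · refine ⟨(row.length : Int) - 1, by rw [PySem.List.mem_pyRange_one]; constructor <;> omega,
        Or.inr rfl, ?_⟩
      rw [pyGetD_neg_one_eq row 0 hne]

-- row-local interior positions are exactly row[1:-1]
theorem inner_iff (row : List Int) (x : Int) :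
    (∃ j ∈ PySem.List.pyRange 0 (row.length : Int) 1,
        ¬(j = 0 ∨ j = (row.length : Int) - 1) ∧ x = PySem.List.pyGetD row j 0)
      ↔ x ∈ PySem.List.slice row (some 1) (some (-1)) := by
  rw [slice_mid, mem_drop_one_take]
  constructor
  · rintro ⟨j, hj, hd, rfl⟩
    rw [PySem.List.mem_pyRange_one] at hj
    push Not at hd
    refine ⟨j.toNat - 1, by omega, by omega, ?_⟩
    rw [PySem.List.pyGetD_eq_getElem _ _ hj.1 (by omega)]
    congr 1
    omega
  · rintro ⟨j, hj, h, rfl⟩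
    refine ⟨(j : Int) + 1, ?_, ?_, ?_⟩
    · rw [PySem.List.mem_pyRange_one]; constructor <;> omega
    · push Not; constructor <;> omega
    · rw [PySem.List.pyGetD_eq_getElem _ _ (by omega) (by omega)]
      exact List.getElem_of_eq rfl _

-- A's nested per-cell fold splits into two independent folds of Set.update
theorem pair_fold_split {γ : Type} (l : List γ) (c : γ → Prop) [DecidablePred c] (v : γ → Int)
    (st : PySem.Set Int × PySem.Set Int) :
    l.foldl (fun st j => if c j then (PySem.Set.add st.1 (v j), st.2)
                         else (st.1, PySem.Set.add st.2 (v j))) st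
      = (PySem.Set.update st.1 ((l.filter (fun j => decide (c j))).map v),
         PySem.Set.update st.2 ((l.filter (fun j => decide (¬ c j))).map v)) := by
  induction l generalizing st with
  | nil => simp [PySem.Set.update]
  | cons a t ih =>
    by_cases hc : c a <;>
      simp [hc, ih, PySem.Set.update_cons]

theorem A_fold (grid : List (List Int)) (l : List Int) (st : PySem.Set Int × PySem.Set Int) :
    l.foldl (fun (st : PySem.Set Int × PySem.Set Int) i =>
        (PySem.List.pyRange 0 ((PySem.List.pyGetD grid i []).length : Int) 1).foldl
          (fun st j =>
            if i = 0 ∨ i = (grid.length : Int) - 1 ∨ j = 0 ∨ j = ((PySem.List.pyGetD grid i []).length : Int) - 1 then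
              (PySem.Set.add st.1 (PySem.List.pyGetD (PySem.List.pyGetD grid i []) j 0), st.2)
            else
              (st.1, PySem.Set.add st.2 (PySem.List.pyGetD (PySem.List.pyGetD grid i []) j 0)))
          st) st
      = (l.foldl (fun s i => PySem.Set.update s
            (((PySem.List.pyRange 0 (((PySem.List.pyGetD grid i []).length : Int)) 1).filter
                (fun j => decide (i = 0 ∨ i = (grid.length : Int) - 1 ∨ j = 0 ∨ j = ((PySem.List.pyGetD grid i []).length : Int) - 1))).map
              (fun j => PySem.List.pyGetD (PySem.List.pyGetD grid i []) j 0))) st.1,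
         l.foldl (fun s i => PySem.Set.update s
            (((PySem.List.pyRange 0 (((PySem.List.pyGetD grid i []).length : Int)) 1).filter
                (fun j => decide (¬ (i = 0 ∨ i = (grid.length : Int) - 1 ∨ j = 0 ∨ j = ((PySem.List.pyGetD grid i []).length : Int) - 1)))).map
              (fun j => PySem.List.pyGetD (PySem.List.pyGetD grid i []) j 0))) st.2) := by
  induction l generalizing st with
  | nil => rfl
  | cons a t ih =>
    rw [List.foldl_cons, List.foldl_cons, List.foldl_cons]
    rw [pair_fold_split
      (PySem.List.pyRange 0 (((PySem.List.pyGetD grid a []).length : Int)) 1)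
      (fun j => a = 0 ∨ a = (grid.length : Int) - 1 ∨ j = 0 ∨ j = ((PySem.List.pyGetD grid a []).length : Int) - 1)
      (fun j => PySem.List.pyGetD (PySem.List.pyGetD grid a []) j 0) st]
    exact ih _

-- B's pair fold splits into its two independent list folds
theorem B_fold (l : List (List Int)) (st : List Int × List Int) :
    l.foldl (fun (st : List Int × List Int) row =>
        ((if row = [] then st.1
          else st.1 ++ [PySem.List.pyGetD row 0 0, PySem.List.pyGetD row (-1) 0]),
         st.2 ++ PySem.List.slice row (some 1) (some (-1)))) st
      = (l.foldl (fun b r => if r = [] then b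
            else b ++ [PySem.List.pyGetD r 0 0, PySem.List.pyGetD r (-1) 0]) st.1,
         l.foldl (fun s r => s ++ PySem.List.slice r (some 1) (some (-1))) st.2) := by
  induction l generalizing st with
  | nil => rfl
  | cons a t ih =>
    by_cases ha : a = [] <;> simp only [List.foldl_cons, ha, ite_false, ite_true] <;>
      exact ih _

-- membership in B's boundary fold
theorem mem_B_bnd (l : List (List Int)) (s : List Int) (x : Int) :
    x ∈ l.foldl (fun b r => if r = [] then b
          else b ++ [PySem.List.pyGetD r 0 0, PySem.List.pyGetD r (-1) 0]) s
      ↔ x ∈ s ∨ ∃ r ∈ l, r ≠ [] ∧ (x = PySem.List.pyGetD r 0 0 ∨ x = PySem.List.pyGetD r (-1) 0) := by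
  induction l generalizing s with
  | nil => simp
  | cons a t ih =>
    by_cases ha : a = []
    · rw [List.foldl_cons, if_pos ha, ih]
      constructor
      · rintro (h | ⟨r, hr, hx⟩)
        · exact Or.inl h
        · exact Or.inr ⟨r, List.mem_cons_of_mem _ hr, hx⟩
      · rintro (h | ⟨r, hr, hne, hx⟩)
        · exact Or.inl h
        · rcases List.mem_cons.mp hr with rfl | hr
          · exact absurd ha hne
          · exact Or.inr ⟨r, hr, hne, hx⟩
    · rw [List.foldl_cons, if_neg ha, ih]
      constructor
      · rintro (h | ⟨r, hr, hx⟩)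
        · rcases List.mem_append.mp h with h | h
          · exact Or.inl h
          · rcases List.mem_cons.mp h with rfl | h
            · exact Or.inr ⟨a, by simp, ha, Or.inl rfl⟩
            · exact Or.inr ⟨a, by simp, ha, Or.inr (by simpa using h)⟩
        · exact Or.inr ⟨r, List.mem_cons_of_mem _ hr, hx⟩
      · rintro (h | ⟨r, hr, hne, hx⟩)
        · exact Or.inl (List.mem_append.mpr (Or.inl h))
        · rcases List.mem_cons.mp hr with rfl | hr
          · refine Or.inl (List.mem_append.mpr (Or.inr ?_))
            rcases hx with rfl | rfl
            · simp
            · simp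
          · exact Or.inr ⟨r, hr, hne, hx⟩

-- membership in B's interior fold
theorem mem_B_int (l : List (List Int)) (s : List Int) (x : Int) :
    x ∈ l.foldl (fun s r => s ++ PySem.List.slice r (some 1) (some (-1))) s
      ↔ x ∈ s ∨ ∃ r ∈ l, x ∈ PySem.List.slice r (some 1) (some (-1)) := by
  induction l generalizing s with
  | nil => simp
  | cons a t ih =>
    rw [List.foldl_cons, ih]
    constructor
    · rintro (h | ⟨r, hr, hx⟩)
      · rcases List.mem_append.mp h with h | h
        · exact Or.inl h
        · exact Or.inr ⟨a, by simp, h⟩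
      · exact Or.inr ⟨r, List.mem_cons_of_mem _ hr, hx⟩
    · rintro (h | ⟨r, hr, hx⟩)
      · exact Or.inl (List.mem_append.mpr (Or.inl h))
      · rcases List.mem_cons.mp hr with rfl | hr
        · exact Or.inl (List.mem_append.mpr (Or.inr hx))
        · exact Or.inr ⟨r, hr, hx⟩

-- A's boundary positions across the grid are: the first row, the last row, and the edge cells
-- of each nonempty middle row
theorem A_boundary_iff (grid : List (List Int)) (h3 : 3 ≤ grid.length) (x : Int) :
    (∃ i ∈ PySem.List.pyRange 0 (grid.length : Int) 1,
        ∃ j ∈ PySem.List.pyRange 0 (((PySem.List.pyGetD grid i []).length : Int)) 1,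
          (i = 0 ∨ i = (grid.length : Int) - 1 ∨ j = 0 ∨ j = ((PySem.List.pyGetD grid i []).length : Int) - 1) ∧
            x = PySem.List.pyGetD (PySem.List.pyGetD grid i []) j 0)
      ↔ (x ∈ PySem.List.pyGetD grid 0 [] ∨ x ∈ PySem.List.pyGetD grid (-1) [] ∨
          ∃ r ∈ PySem.List.slice grid (some 1) (some (-1)),
            r ≠ [] ∧ (x = PySem.List.pyGetD r 0 0 ∨ x = PySem.List.pyGetD r (-1) 0)) := by
  have hne : grid ≠ [] := by intro h; subst h; simp at h3
  constructor
  · rintro ⟨i, hi, j, hj, hc, rfl⟩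
    rw [PySem.List.mem_pyRange_one] at hi
    rcases eq_or_ne i 0 with rfl | hi0
    · exact Or.inl ((mem_row_iff _ _).mp ⟨j, hj, rfl⟩)
    rcases eq_or_ne i ((grid.length : Int) - 1) with rfl | hiN
    · refine Or.inr (Or.inl ?_)
      rw [pyGetD_neg_one_eq grid [] hne]
      exact (mem_row_iff _ _).mp ⟨j, hj, rfl⟩
    · refine Or.inr (Or.inr ?_)
      have hc' : j = 0 ∨ j = ((PySem.List.pyGetD grid i []).length : Int) - 1 := by tauto
      have hr := (edge_iff (PySem.List.pyGetD grid i []) _).mp ⟨j, hj, hc', rfl⟩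
      refine ⟨PySem.List.pyGetD grid i [], ?_, hr⟩
      rw [slice_mid, mem_drop_one_take]
      refine ⟨i.toNat - 1, by omega, by omega, ?_⟩
      rw [PySem.List.pyGetD_eq_getElem _ _ hi.1 (by omega)]
      congr 1
      omega
  · rintro (hx | hx | ⟨r, hr, hre⟩)
    · obtain ⟨j, hj, rfl⟩ := (mem_row_iff _ x).mpr hx
      exact ⟨0, by rw [PySem.List.mem_pyRange_one]; constructor <;> omega, j, hj, Or.inl rfl, rfl⟩
    · rw [pyGetD_neg_one_eq grid [] hne] at hx
      obtain ⟨j, hj, rfl⟩ := (mem_row_iff _ x).mpr hx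
      exact ⟨(grid.length : Int) - 1,
        by rw [PySem.List.mem_pyRange_one]; constructor <;> omega, j, hj, Or.inr (Or.inl rfl), rfl⟩
    · rw [slice_mid, mem_drop_one_take] at hr
      obtain ⟨k, hk, hklen, rfl⟩ := hr
      have hrow : PySem.List.pyGetD grid ((k : Int) + 1) [] = grid[k + 1] := by
        rw [PySem.List.pyGetD_eq_getElem _ _ (by omega) (by omega)]
        exact List.getElem_of_eq rfl _
      obtain ⟨j, hj, hd, rfl⟩ := (edge_iff _ x).mpr hre
      refine ⟨(k : Int) + 1, by rw [PySem.List.mem_pyRange_one]; constructor <;> omega, j, ?_, ?_, ?_⟩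
      · rw [hrow]; exact hj
      · rw [hrow]; exact Or.inr (Or.inr hd)
      · rw [hrow]

-- A's interior positions across the grid are exactly the interior slices of the middle rows
theorem A_interior_iff (grid : List (List Int)) (h3 : 3 ≤ grid.length) (x : Int) :
    (∃ i ∈ PySem.List.pyRange 0 (grid.length : Int) 1,
        ∃ j ∈ PySem.List.pyRange 0 (((PySem.List.pyGetD grid i []).length : Int)) 1,
          ¬(i = 0 ∨ i = (grid.length : Int) - 1 ∨ j = 0 ∨ j = ((PySem.List.pyGetD grid i []).length : Int) - 1) ∧
            x = PySem.List.pyGetD (PySem.List.pyGetD grid i []) j 0)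
      ↔ ∃ r ∈ PySem.List.slice grid (some 1) (some (-1)), x ∈ PySem.List.slice r (some 1) (some (-1)) := by
  constructor
  · rintro ⟨i, hi, j, hj, hc, rfl⟩
    rw [PySem.List.mem_pyRange_one] at hi
    push Not at hc
    obtain ⟨hi0, hiN, hj0, hjM⟩ := hc
    refine ⟨PySem.List.pyGetD grid i [], ?_, ?_⟩
    · rw [slice_mid, mem_drop_one_take]
      refine ⟨i.toNat - 1, by omega, by omega, ?_⟩
      rw [PySem.List.pyGetD_eq_getElem _ _ hi.1 (by omega)]
      congr 1
      omega
    · exact (inner_iff _ _).mp ⟨j, hj, by push Not; exact ⟨hj0, hjM⟩, rfl⟩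
  · rintro ⟨r, hr, hx⟩
    rw [slice_mid, mem_drop_one_take] at hr
    obtain ⟨k, hk, hklen, rfl⟩ := hr
    have hrow : PySem.List.pyGetD grid ((k : Int) + 1) [] = grid[k + 1] := by
      rw [PySem.List.pyGetD_eq_getElem _ _ (by omega) (by omega)]
      exact List.getElem_of_eq rfl _
    obtain ⟨j, hj, hd, rfl⟩ := (inner_iff _ x).mpr hx
    push Not at hd
    refine ⟨(k : Int) + 1, by rw [PySem.List.mem_pyRange_one]; constructor <;> omega, j, ?_, ?_, ?_⟩
    · rw [hrow]; exact hj
    · rw [hrow]; push Not; exact ⟨by omega, by omega, hd.1, hd.2⟩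
    · rw [hrow]

-- membership of A's boundary fold restated with the per-row j-quantifier
theorem mem_A_filter (grid : List (List Int)) (c : Int → Int → Prop) [∀ i j, Decidable (c i j)]
    (i x : Int) :
    x ∈ ((PySem.List.pyRange 0 (((PySem.List.pyGetD grid i []).length : Int)) 1).filter
          (fun j => decide (c i j))).map (fun j => PySem.List.pyGetD (PySem.List.pyGetD grid i []) j 0)
      ↔ ∃ j ∈ PySem.List.pyRange 0 (((PySem.List.pyGetD grid i []).length : Int)) 1,
          c i j ∧ x = PySem.List.pyGetD (PySem.List.pyGetD grid i []) j 0 := by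
  simp only [List.mem_map, List.mem_filter, decide_eq_true_eq]
  constructor
  · rintro ⟨j, ⟨h1, h2⟩, rfl⟩; exact ⟨j, h1, h2, rfl⟩
  · rintro ⟨j, h1, h2, rfl⟩; exact ⟨j, ⟨h1, h2⟩, rfl⟩

-- a nodup dedup set strictly shorter than its intersection companion iff it has an exclusive element
theorem inter_lt_left (S I : PySem.Set Int) (hS : S.Nodup) :
    (PySem.Set.inter S I).length < S.length ↔ ∃ x ∈ S, x ∉ I := by
  constructor
  · intro h
    by_contra hc
    push Not at hc
    have hsub : S ⊆ PySem.Set.inter S I := by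
      intro x hx
      exact (PySem.Set.mem_inter _ _ _).mpr ⟨hx, hc x hx⟩
    have := (List.subperm_of_subset hS hsub).length_le
    omega
  · rintro ⟨x, hxS, hxI⟩
    have hT : (PySem.Set.inter S I).Nodup := PySem.Set.nodup_inter _ _ hS
    have hsub : PySem.Set.inter S I ⊆ S.erase x := by
      intro y hy
      rw [PySem.Set.mem_inter] at hy
      rcases eq_or_ne y x with rfl | hne
      · exact absurd hy.2 hxI
      · exact (List.mem_erase_of_ne hne).mpr hy.1
    have h1 := (List.subperm_of_subset hT hsub).length_le
    have h2 := List.length_erase_of_mem hxS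
    have hpos : 0 < S.length := List.length_pos_iff.mpr (by rintro rfl; simp at hxS)
    omega

theorem inter_lt_right (S I : PySem.Set Int) (hS : S.Nodup) (hI : I.Nodup) :
    (PySem.Set.inter S I).length < I.length ↔ ∃ x ∈ I, x ∉ S := by
  constructor
  · intro h
    by_contra hc
    push Not at hc
    have hsub : I ⊆ PySem.Set.inter S I := by
      intro x hx
      exact (PySem.Set.mem_inter _ _ _).mpr ⟨hc x hx, hx⟩
    have := (List.subperm_of_subset hI hsub).length_le
    omega
  · rintro ⟨x, hxI, hxS⟩
    have hT : (PySem.Set.inter S I).Nodup := PySem.Set.nodup_inter _ _ hS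
    have hsub : PySem.Set.inter S I ⊆ I.erase x := by
      intro y hy
      rw [PySem.Set.mem_inter] at hy
      rcases eq_or_ne y x with rfl | hne
      · exact absurd hy.1 hxS
      · exact (List.mem_erase_of_ne hne).mpr hy.2
    have h1 := (List.subperm_of_subset hT hsub).length_le
    have h2 := List.length_erase_of_mem hxI
    have hpos : 0 < I.length := List.length_pos_iff.mpr (by rintro rfl; simp at hxI)
    omega

-- final bridge: A's cardinality comparison equals B's double existence check
theorem final_eq (S I : PySem.Set Int) (hS : S.Nodup) (hI : I.Nodup) (Lb Li : List Int)
    (hb : ∀ x, x ∈ S ↔ x ∈ Lb) (hi : ∀ x, x ∈ I ↔ x ∈ Li) :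
    decide ((PySem.Set.inter S I).length < min S.length I.length)
      = ((Lb.any (fun v => !decide (v ∈ Li))) && (Li.any (fun v => !decide (v ∈ Lb)))) := by
  rw [Bool.eq_iff_iff]
  simp only [decide_eq_true_eq, Bool.and_eq_true, List.any_eq_true, Bool.not_eq_true',
    decide_eq_false_iff_not, lt_min_iff]
  rw [inter_lt_left S I hS, inter_lt_right S I hS hI]
  simp only [hb, hi]

-- ===== VERDICT (by name: the statement is the Claim_ definition above) =====
theorem has_boundary_pattern_py_spec : Claim_equal_has_boundary_pattern_py := by
  intro grid _
  unfold Spec_has_boundary_pattern_py has_boundary_pattern_py has_boundary_pattern_py_alt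
  by_cases hg : grid = [] ∨ (grid.length : Int) < 3 ∨ PySem.List.pyGetD grid 0 [] = [] ∨ ((PySem.List.pyGetD grid 0 []).length : Int) < 3
  · rw [if_pos hg, if_pos hg]
  · rw [if_neg hg, if_neg hg]
    push Not at hg
    obtain ⟨hne, h3, -, -⟩ := hg
    have h3' : 3 ≤ grid.length := by exact_mod_cast h3
    rw [A_fold, B_fold]
    apply final_eq
    · exact nodup_foldl_upd _ _ _ List.nodup_nil
    · exact nodup_foldl_upd _ _ _ List.nodup_nil
    · intro x
      rw [mem_foldl_upd, mem_B_bnd]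
      simp only [mem_A_filter grid
        (fun i j => i = 0 ∨ i = (grid.length : Int) - 1 ∨ j = 0 ∨ j = ((PySem.List.pyGetD grid i []).length : Int) - 1),
        List.mem_append]
      rw [show (x ∈ (PySem.Set.empty : PySem.Set Int)) ↔ False by simp [PySem.Set.empty]]
      rw [A_boundary_iff grid h3' x]
      simp [or_assoc]
    · intro x
      rw [mem_foldl_upd, mem_B_int]
      simp only [mem_A_filter grid
        (fun i j => ¬ (i = 0 ∨ i = (grid.length : Int) - 1 ∨ j = 0 ∨ j = ((PySem.List.pyGetD grid i []).length : Int) - 1))]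
      rw [show (x ∈ (PySem.Set.empty : PySem.Set Int)) ↔ False by simp [PySem.Set.empty]]
      rw [A_interior_iff grid h3' x]
      simp
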